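-- pv_equiv track=rewrite | github.com/grlinski/euler-python-solutions | Euler Pandigital multiples.py | panDig2
-- ===== SOURCE A (Python) =====
-- def panDig2(x1):
--
--
--     x2 = x1*2
--
--
--
--
--     s1 = str(x1)
--     s2 = str(x2)
--
--
--     d = s1+s2
--
--     numbers = [1,2,3,4,5,6,7,8,9]
--     setter = set(numbers)
--
--     for i in d:
--         try:
--             setter.remove(int(i))
--         except:
--             return False
--     if len(setter) > 0:
--         return False
--     return True
-- ===== SOURCE B (Python) =====
-- def panDig2(x1):
--     d = str(x1) + str(x1 * 2)
--     return sorted(d) == list('123456789')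
-- ===== Notes on version B (the rewrite author's own statement) =====
-- stated objective: simpler
-- what changed: Replaces A's incremental set-removal loop with try/except by sorting the concatenated digit string once and comparing it to the canonical list ['1'..'9'] (multiset equality rejects '-', '0', duplicates and wrong length in one comparison).
import Mathlib
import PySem

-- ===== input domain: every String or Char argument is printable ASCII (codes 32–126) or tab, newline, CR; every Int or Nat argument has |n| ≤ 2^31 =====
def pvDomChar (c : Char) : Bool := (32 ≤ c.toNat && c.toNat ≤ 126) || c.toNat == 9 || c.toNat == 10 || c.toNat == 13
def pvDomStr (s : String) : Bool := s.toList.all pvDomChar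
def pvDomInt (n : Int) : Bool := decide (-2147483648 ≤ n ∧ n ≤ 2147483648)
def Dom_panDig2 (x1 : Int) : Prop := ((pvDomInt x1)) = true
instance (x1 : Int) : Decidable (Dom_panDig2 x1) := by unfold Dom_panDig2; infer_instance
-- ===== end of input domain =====

-- B replaces A's set-removal loop (with try/except) by sorting the concatenated
-- digit string once and comparing it to the canonical list ['1'..'9'] (simpler).

-- ===== PORT A =====
-- the 'for i in d' loop: int(i) or setter.remove(...) failing returns False;
-- after the loop, 'if len(setter) > 0: return False; return True'
def panDig2Go : List Char → PySem.Set Int → Bool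
  | [], setter => if PySem.Set.len setter > 0 then false else true
  | c :: cs, setter =>
    match PySem.Int.ofStr? (String.singleton c) with
    | none => false
    | some v =>
      match PySem.Set.remove? setter v with
      | none => false
      | some s' => panDig2Go cs s'

def panDig2 (x1 : Int) : Bool :=
  let x2 := x1 * 2
  let s1 := PySem.Int.toStr x1
  let s2 := PySem.Int.toStr x2
  let d := s1 ++ s2
  let numbers : List Int := [1, 2, 3, 4, 5, 6, 7, 8, 9]
  let setter := PySem.Set.ofList numbers
  panDig2Go d.toList setter

-- ===== PORT B =====
def panDig2_alt (x1 : Int) : Bool :=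
  let d := PySem.Int.toStr x1 ++ PySem.Int.toStr (x1 * 2)
  decide (PySem.List.sorted d.toList (fun c => c) false
            = ['1', '2', '3', '4', '5', '6', '7', '8', '9'])

-- ===== PRECONDITION & SPEC =====
def Spec_panDig2 (x1 : Int) (out : Bool) : Prop := out = panDig2_alt x1
instance (x1 : Int) (out : Bool) : Decidable (Spec_panDig2 x1 out) := by unfold Spec_panDig2; infer_instance

-- ===== CLAIM (what is proved, stated in full; the proofs are below) =====
def Claim_equal_panDig2 : Prop := ∀ (x1 : Int), Dom_panDig2 x1 → Spec_panDig2 x1 (panDig2 x1)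

-- ===== LEMMAS AND PROOFS =====

def pvAllDigits : List Char := ['0', '1', '2', '3', '4', '5', '6', '7', '8', '9']

def pvCanon : List Char := ['1', '2', '3', '4', '5', '6', '7', '8', '9']

/-- digit value of a digit char, char of a digit value -/
def pvVal (c : Char) : Int := (c.toNat : Int) - 48

def pvChr (v : Int) : Char := Char.ofNat (48 + v.toNat)

-- every char produced by Nat.toDigitsCore base 10 is a decimal digit (or came from acc)
lemma pvToDigitsCore_mem (f : Nat) : ∀ (n : Nat) (acc : List Char),
    ∀ c ∈ Nat.toDigitsCore 10 f n acc, c ∈ pvAllDigits ∨ c ∈ acc := by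
  induction f with
  | zero => intro n acc c hc; exact Or.inr hc
  | succ f ih =>
    intro n acc c hc
    have hd : Nat.digitChar (n % 10) ∈ pvAllDigits := by
      have : n % 10 < 10 := Nat.mod_lt _ (by norm_num)
      interval_cases h : n % 10 <;> decide
    simp only [Nat.toDigitsCore] at hc
    split at hc
    · rcases List.mem_cons.mp hc with h | h
      · exact Or.inl (h ▸ hd)
      · exact Or.inr h
    · rcases ih (n / 10) (Nat.digitChar (n % 10) :: acc) c hc with h | h
      · exact Or.inl h
      · rcases List.mem_cons.mp h with h | h
        · exact Or.inl (h ▸ hd)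
        · exact Or.inr h

lemma pvToChars_mem (n : Int) : ∀ c ∈ PySem.Int.toChars n, c = '-' ∨ c ∈ pvAllDigits := by
  intro c hc
  unfold PySem.Int.toChars Nat.toDigits at hc
  split at hc
  · rcases List.mem_cons.mp hc with h | h
    · exact Or.inl h
    · rcases pvToDigitsCore_mem _ _ _ c h with h | h
      · exact Or.inr h
      · simp at h
  · rcases pvToDigitsCore_mem _ _ _ c hc with h | h
    · exact Or.inr h
    · simp at h

-- int(c) for a single decimal digit char
lemma pvOfStr_digit (c : Char) (hc : c ∈ pvAllDigits) :
    PySem.Int.ofStr? (String.singleton c) = some (pvVal c) := by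
  fin_cases hc <;> decide

lemma pvOfStr_dash : PySem.Int.ofStr? (String.singleton '-') = none := by decide

lemma pvChr_val (c : Char) (hc : c ∈ pvAllDigits) : pvChr (pvVal c) = c := by
  fin_cases hc <;> decide

lemma pvChr_ne_dash (v : Int) (hv : 1 ≤ v ∧ v ≤ 9) : pvChr v ≠ '-' := by
  obtain ⟨h1, h9⟩ := hv
  have : v = 1 ∨ v = 2 ∨ v = 3 ∨ v = 4 ∨ v = 5 ∨ v = 6 ∨ v = 7 ∨ v = 8 ∨ v = 9 := by omega
  rcases this with rfl | rfl | rfl | rfl | rfl | rfl | rfl | rfl | rfl <;> decide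

lemma pvVal_chr (v : Int) (hv : 1 ≤ v ∧ v ≤ 9) : pvVal (pvChr v) = v := by
  obtain ⟨h1, h9⟩ := hv
  have : v = 1 ∨ v = 2 ∨ v = 3 ∨ v = 4 ∨ v = 5 ∨ v = 6 ∨ v = 7 ∨ v = 8 ∨ v = 9 := by omega
  rcases this with rfl | rfl | rfl | rfl | rfl | rfl | rfl | rfl | rfl <;> decide

lemma pvRemove_eq_erase (s : List Int) (hnd : s.Nodup) (v : Int) (hv : v ∈ s) :
    PySem.Set.remove? s v = some (s.erase v) := by
  unfold PySem.Set.remove? PySem.Set.discard PySem.Set.contains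
  rw [if_pos (by simpa using hv)]
  congr 1
  rw [List.Nodup.erase_eq_filter hnd]
  congr 1

lemma pvRemove_eq_none (s : List Int) (v : Int) (hv : v ∉ s) :
    PySem.Set.remove? s v = none := by
  unfold PySem.Set.remove? PySem.Set.contains
  rw [if_neg (by simpa using hv)]

/-- invariant of A's loop: it succeeds iff the remaining chars are a permutation of
the chars of the remaining set elements -/
lemma pvGo_iff (cs : List Char) : ∀ (s : List Int), s.Nodup →
    (∀ v ∈ s, 1 ≤ v ∧ v ≤ 9) → (∀ c ∈ cs, c = '-' ∨ c ∈ pvAllDigits) →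
    (panDig2Go cs s = true ↔ cs.Perm (s.map pvChr)) := by
  induction cs with
  | nil =>
    intro s _ _ _
    constructor
    · intro h
      simp only [panDig2Go] at h
      have hs : s = [] := by
        by_contra hne
        rw [if_pos (by unfold PySem.Set.len; simp [List.length_pos_iff.mpr hne])] at h
        exact Bool.false_ne_true h
      simp [hs]
    · intro h
      have hs : s = [] := by
        have hm : s.map pvChr = [] := List.nil_perm.mp h
        simpa using List.map_eq_nil_iff.mp hm
      simp [hs, panDig2Go, PySem.Set.len]
  | cons c cs ih =>
    intro s hnd hsv hcs
    have hc := hcs c (by simp)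
    rcases hc with rfl | hdig
    · -- c = '-': int('-') raises, and '-' can never be in the map
      simp only [panDig2Go, pvOfStr_dash]
      constructor
      · intro h; exact absurd h (by simp)
      · intro h
        have hm : '-' ∈ s.map pvChr := h.mem_iff.mp (by simp)
        obtain ⟨v, hv, hve⟩ := List.mem_map.mp hm
        exact absurd hve (pvChr_ne_dash v (hsv v hv))
    · simp only [panDig2Go, pvOfStr_digit c hdig]
      by_cases hmem : pvVal c ∈ s
      · have hperm : s.Perm (pvVal c :: s.erase (pvVal c)) := List.perm_cons_erase hmem
        have hmapperm : (s.map pvChr).Perm (c :: (s.erase (pvVal c)).map pvChr) := by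
          have := hperm.map pvChr
          simpa [pvChr_val c hdig] using this
        rw [pvRemove_eq_erase s hnd _ hmem]
        have ihh := ih (s.erase (pvVal c)) (hnd.erase _)
          (fun v hv => hsv v (List.mem_of_mem_erase hv))
          (fun x hx => hcs x (by simp [hx]))
        simp only [ihh]
        constructor
        · intro h
          exact ((h.cons c).trans hmapperm.symm)
        · intro h
          have := h.trans hmapperm
          exact this.cons_inv
      · rw [pvRemove_eq_none s _ hmem]
        constructor
        · intro h; exact absurd h (by simp)
        · intro h
          have hm : c ∈ s.map pvChr := h.mem_iff.mp (by simp)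
          obtain ⟨v, hv, hve⟩ := List.mem_map.mp hm
          have : pvVal c = v := by rw [← hve, pvVal_chr v (hsv v hv)]
          exact (hmem (this ▸ hv)).elim

lemma pvA_iff (x1 : Int) :
    panDig2 x1 = true ↔ (PySem.Int.toChars x1 ++ PySem.Int.toChars (x1 * 2)).Perm pvCanon := by
  unfold panDig2
  have hlist : (PySem.Int.toStr x1 ++ PySem.Int.toStr (x1 * 2)).toList
      = PySem.Int.toChars x1 ++ PySem.Int.toChars (x1 * 2) := by
    rw [String.toList_append, PySem.Int.toList_toStr, PySem.Int.toList_toStr]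
  simp only [hlist]
  have hset : PySem.Set.ofList ([1, 2, 3, 4, 5, 6, 7, 8, 9] : List Int)
      = ([1, 2, 3, 4, 5, 6, 7, 8, 9] : List Int) := by decide
  rw [hset]
  have hmap : (([1, 2, 3, 4, 5, 6, 7, 8, 9] : List Int).map pvChr) = pvCanon := by decide
  rw [pvGo_iff _ _ (by decide) (by decide)
    (fun c hc => by
      rcases List.mem_append.mp hc with h | h
      · exact pvToChars_mem x1 c h
      · exact pvToChars_mem (x1 * 2) c h), hmap]

lemma pvB_iff (x1 : Int) :
    panDig2_alt x1 = true ↔ (PySem.Int.toChars x1 ++ PySem.Int.toChars (x1 * 2)).Perm pvCanon := by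
  unfold panDig2_alt
  have hlist : (PySem.Int.toStr x1 ++ PySem.Int.toStr (x1 * 2)).toList
      = PySem.Int.toChars x1 ++ PySem.Int.toChars (x1 * 2) := by
    rw [String.toList_append, PySem.Int.toList_toStr, PySem.Int.toList_toStr]
  simp only [hlist, decide_eq_true_eq]
  constructor
  · intro h
    have hp := PySem.List.sorted_perm (PySem.Int.toChars x1 ++ PySem.Int.toChars (x1 * 2)) (fun c => c) false
    rw [h] at hp
    exact hp.symm
  · intro h
    exact PySem.List.sorted_eq_of_perm_of_pairwise_lt _ _ _ h.symm (by decide)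

-- ===== VERDICT (by name: the statement is the Claim_ definition above) =====
theorem panDig2_spec : Claim_equal_panDig2 := by
  intro x1 _
  unfold Spec_panDig2
  by_cases h : (PySem.Int.toChars x1 ++ PySem.Int.toChars (x1 * 2)).Perm pvCanon
  · rw [(pvA_iff x1).mpr h, ((pvB_iff x1).mpr h).symm]
  · have hA := (pvA_iff x1).not.mpr h
    have hB := (pvB_iff x1).not.mpr h
    simp only [Bool.not_eq_true] at hA hB
    rw [hA, hB]
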